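-- pv_equiv track=rewrite | github.com/techbeast911/FASTAPI_DATA_UNIFIER_KOOL | src/zoho_nigeria_purchases/utils/rag2.py | format_data_for_llm
-- ===== SOURCE A (Python) =====
-- def format_data_for_llm(column_names, data_rows):
--     """
--     Formats the database query results into a human-readable string
--     suitable for an LLM. Excludes the 'embedding' and 'distance' columns.
--     """
--     if not data_rows:
--         return ""
--     formatted_texts = []
--     # Filter out embedding and distance columns for LLM output
--     display_column_names = [col for col in column_names if col not in ['embedding', 'distance']]
--     display_indices = [column_names.index(col) for col in display_column_names]
--
--     for row_idx, row in enumerate(data_rows):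
--         text_parts = []
--         for display_col_idx, original_col_idx in enumerate(display_indices):
--             col_name = display_column_names[display_col_idx]
--             if row[original_col_idx] is not None:
--                 text_parts.append(f"{col_name}: {row[original_col_idx]}")
--         if text_parts:
--             formatted_texts.append(f"Record {row_idx + 1}: " + "; ".join(text_parts))
--     return "\n\n".join(formatted_texts)
-- ===== SOURCE B (Python) =====
-- def format_data_for_llm(column_names, data_rows):
--     """
--     Formats the database query results into a human-readable string
--     suitable for an LLM. Excludes the 'embedding' and 'distance' columns.
--
--     Column-major re-implementation: one outer pass over columns fills a
--     per-row parts table (loop interchange), then the records are assembled.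
--     """
--     if not data_rows:
--         return ""
--     parts = [[] for _ in data_rows]
--     for c, name in enumerate(column_names):
--         if name == 'embedding' or name == 'distance':
--             continue
--         parts = [ps + [f"{name}: {row[c]}"] if row[c] is not None else ps
--                  for ps, row in zip(parts, data_rows)]
--     out = []
--     for r, ps in enumerate(parts):
--         if ps:
--             out.append(f"Record {r + 1}: " + "; ".join(ps))
--     return "\n\n".join(out)
-- ===== Notes on version B (the rewrite author's own statement) =====
-- stated objective: alternative
-- what changed: Loop interchange: instead of A's per-row inner scan over a precomputed display_column_names/display_indices table (built with list.index), B makes one outer pass over the columns that fills a per-row parts table (column-major traversal), then assembles the records from that table in a second stage.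
-- outside the precondition, e.g. on format_data_for_llm(['a', 'a'], [['1', '2']]): A returns 'Record 1: a: 1; a: 1', B returns 'Record 1: a: 1; a: 2'
import Mathlib
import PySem

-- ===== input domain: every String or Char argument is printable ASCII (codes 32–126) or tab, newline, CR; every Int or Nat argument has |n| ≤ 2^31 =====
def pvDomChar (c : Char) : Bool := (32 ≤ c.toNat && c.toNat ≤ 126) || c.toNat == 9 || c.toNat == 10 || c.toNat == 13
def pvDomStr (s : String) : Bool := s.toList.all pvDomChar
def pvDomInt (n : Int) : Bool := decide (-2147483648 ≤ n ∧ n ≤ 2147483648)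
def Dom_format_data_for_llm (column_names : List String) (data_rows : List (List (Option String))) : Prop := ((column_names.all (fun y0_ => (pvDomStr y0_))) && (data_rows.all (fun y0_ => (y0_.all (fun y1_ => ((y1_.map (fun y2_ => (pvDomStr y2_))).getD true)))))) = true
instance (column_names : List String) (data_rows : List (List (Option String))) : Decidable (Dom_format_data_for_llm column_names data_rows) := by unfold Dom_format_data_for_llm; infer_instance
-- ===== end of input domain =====

-- B interchanges the loops: one outer pass over the COLUMNS fills a per-row parts table
-- (no display-name/display-index tables, no list.index), then the records are assembled.

-- 'col not in ['embedding', 'distance']' (shared helper, used by both ports)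
def pvKeep (c : String) : Bool := !(c == "embedding" || c == "distance")

-- ===== PORT A =====
-- A's inner loop body ('col_name = ...; if row[i] is not None: text_parts.append(...)') as a
-- named step function, so the lemmas below can refer to it.
def pvInnerStepA (display : List String) (row : List (Option String)) (tp : List String)
    (q : Int × Nat) : List String :=
  let col_name := (PySem.List.pyGet? display q.1).getD ""
  match PySem.List.pyGet? row (q.2 : Int) with
  | some (some v) => tp ++ [col_name ++ ": " ++ v]
  | _ => tp

-- Literal transliteration of A. The '.getD 0' after index? and '.getD ""' after pyGet? are
-- unreachable (each display column is a member of column_names; display indices are in range);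
-- the '| _ => tp' branch merges Python's 'row[i] is None' skip with the IndexError case, which
-- Pre_format_data_for_llm excludes.
def format_data_for_llm (column_names : List String) (data_rows : List (List (Option String))) : String :=
  if data_rows = [] then "" else
  let display_column_names := column_names.filter pvKeep
  let display_indices : List Nat :=
    display_column_names.map (fun col => (PySem.List.index? column_names col).getD 0)
  let formatted_texts := (PySem.List.enumerate data_rows 0).foldl (fun acc p =>
      let text_parts := (PySem.List.enumerate display_indices 0).foldl
          (pvInnerStepA display_column_names p.2) []
      if text_parts ≠ [] then
        acc ++ ["Record " ++ PySem.Int.toStr (p.1 + 1) ++ ": " ++ PySem.Str.join "; " text_parts]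
      else acc) []
  PySem.Str.join "\n\n" formatted_texts

-- ===== PORT B =====
-- Source B's column step: 'parts = [ps + [f"{name}: {row[c]}"] if row[c] is not None else ps
-- for ps, row in zip(parts, data_rows)]' — the zip comprehension is List.zipWith; the
-- '| _ => ps' branch merges Python's 'row[c] is None' with the IndexError case (outside Pre_).
def pvColStep (data_rows : List (List (Option String))) (parts : List (List String))
    (q : Int × String) : List (List String) :=
  if pvKeep q.2 then
    List.zipWith (fun ps row =>
      match PySem.List.pyGet? row q.1 with
      | some (some v) => ps ++ [q.2 ++ ": " ++ v]
      | _ => ps) parts data_rows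
  else parts

def format_data_for_llm_alt (column_names : List String) (data_rows : List (List (Option String))) : String :=
  if data_rows = [] then "" else
  let parts := (PySem.List.enumerate column_names 0).foldl (pvColStep data_rows)
    (data_rows.map (fun _ => ([] : List String)))
  let out := (PySem.List.enumerate parts 0).foldl (fun acc p =>
      if p.2 ≠ [] then
        acc ++ ["Record " ++ PySem.Int.toStr (p.1 + 1) ++ ": " ++ PySem.Str.join "; " p.2]
      else acc) []
  PySem.Str.join "\n\n" out

-- ===== PRECONDITION & SPEC =====
-- Pre_ excludes (a) duplicate column names, on which A's list.index picks the first occurrence's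
-- value for every duplicate (a defensible accident of the index table) while B reads each
-- position's own value, and (b) exactly the inputs where A raises IndexError (a row too short
-- for some kept column index).
def Pre_format_data_for_llm (column_names : List String) (data_rows : List (List (Option String))) : Prop :=
  column_names.Nodup ∧
  ∀ r ∈ data_rows, ∀ i : Nat, i < column_names.length →
    pvKeep (column_names.getD i "") = true → i < r.length
instance (column_names : List String) (data_rows : List (List (Option String))) : Decidable (Pre_format_data_for_llm column_names data_rows) := by unfold Pre_format_data_for_llm; infer_instance

def pvWitness_format_data_for_llm : List String × List (List (Option String)) :=
  (["id", "embedding", "name"], [[some "1", some "e", none], [none, none, some "x"]])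

def Spec_format_data_for_llm (column_names : List String) (data_rows : List (List (Option String))) (out : String) : Prop := out = format_data_for_llm_alt column_names data_rows
instance (column_names : List String) (data_rows : List (List (Option String))) (out : String) : Decidable (Spec_format_data_for_llm column_names data_rows out) := by unfold Spec_format_data_for_llm; infer_instance

-- ===== CLAIM (what is proved, stated in full; the proofs are below) =====
def Claim_equal_format_data_for_llm : Prop := ∀ (column_names : List String) (data_rows : List (List (Option String))), Dom_format_data_for_llm column_names data_rows → Pre_format_data_for_llm column_names data_rows → Spec_format_data_for_llm column_names data_rows (format_data_for_llm column_names data_rows)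

-- ===== LEMMAS AND PROOFS =====

-- A row's kept, non-None "name: value" parts (the common form both ports reduce to).
def pvPerRow (column_names : List String) (row : List (Option String)) : List String :=
  (column_names.zip row).filterMap (fun q =>
    if pvKeep q.1 then q.2.map (fun v => q.1 ++ ": " ++ v) else none)

-- A's inner loop (enumerate over the index list, name looked up in the display list) as a
-- filterMap over display.zip indices; dpre is the already-consumed prefix of the display list.
theorem pv_innerA_zip (row : List (Option String)) :
    ∀ (idxs : List Nat) (dpre dsuf : List String) (acc : List String),
      dsuf.length = idxs.length →
      (PySem.List.enumerate idxs (dpre.length : Int)).foldl (pvInnerStepA (dpre ++ dsuf) row) acc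
      = acc ++ (dsuf.zip idxs).filterMap (fun q =>
          ((PySem.List.pyGet? row (q.2 : Int)).bind id).map (fun v => q.1 ++ ": " ++ v))
  | [], dpre, dsuf, acc, h => by
    have hd : dsuf = [] := List.length_eq_zero_iff.mp (by simpa using h)
    simp [PySem.List.enumerate_nil, hd]
  | i :: is, dpre, [], acc, h => by simp at h
  | i :: is, dpre, d :: ds, acc, h => by
    rw [PySem.List.enumerate_cons, List.foldl_cons]
    have hlen : (dpre.length : Int) + 1 = ((dpre ++ [d]).length : Int) := by simp
    have happ : dpre ++ d :: ds = (dpre ++ [d]) ++ ds := by simp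
    rw [happ, hlen, pv_innerA_zip row is (dpre ++ [d]) ds _ (by simpa using h)]
    rw [List.append_assoc]
    simp only [pvInnerStepA, List.singleton_append, List.zip_cons_cons, List.filterMap_cons,
      PySem.List.pyGet?_append_length, Option.getD_some]
    cases hr : PySem.List.pyGet? row ((i : Nat) : Int) with
    | none => simp
    | some o => cases o <;> simp

-- For Nodup lists, idxOf? of the k-th element is k.
theorem pv_idxOf? (l : List String) (h : l.Nodup) (k : Nat) (hk : k < l.length) :
    l.idxOf? l[k] = some k := by
  rw [List.idxOf?_eq_some_iff]
  refine ⟨hk, rfl, fun j hj => ?_⟩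
  intro hEq
  exact absurd ((List.Nodup.getElem_inj_iff h).mp hEq) (by omega)

-- With Nodup column names, A's (display name, display index) pairs are exactly the kept entries
-- of enumerate(column_names).
theorem pv_zip_index (column_names : List String) (h : column_names.Nodup)
    (F : String → Nat → Option String) :
    ((column_names.filter pvKeep).zip
        ((column_names.filter pvKeep).map (fun col => (PySem.List.index? column_names col).getD 0))).filterMap
        (fun q => F q.1 q.2)
    = (PySem.List.enumerate column_names 0).filterMap
        (fun p => if pvKeep p.2 then F p.2 p.1.toNat else none) := by
  rw [← List.map_prod_left_eq_zip, List.filterMap_map]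
  have hfil : column_names.filter pvKeep
      = ((PySem.List.enumerate column_names 0).filter (fun p => pvKeep p.2)).map Prod.snd := by
    have := List.filter_map (l := PySem.List.enumerate column_names 0) (f := Prod.snd) (p := pvKeep)
    rw [PySem.List.map_snd_enumerate] at this
    rw [this]; rfl
  rw [hfil, List.filterMap_map, List.filterMap_filter]
  apply List.filterMap_congr
  intro p hp
  rcases (PySem.List.mem_enumerate_iff _ _ _).mp hp with ⟨k, hk, rfl⟩
  by_cases hkeep : pvKeep column_names[k] <;>
    simp only [Function.comp, hkeep, if_true, if_false, Bool.false_eq_true]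
  rw [PySem.List.index?_eq_idxOf?, pv_idxOf? column_names h k hk]
  simp

-- The enumerate-with-absolute-index form of a row's parts equals the zipped form pvPerRow (one
-- head is consumed from the row for each step of column_names).
theorem pv_enum_eq_zip :
    ∀ (cn : List String) (row : List (Option String)),
      (PySem.List.enumerate cn 0).filterMap
          (fun p => if pvKeep p.2 then ((PySem.List.pyGet? row p.1).bind id).map (fun v => p.2 ++ ": " ++ v) else none)
      = pvPerRow cn row
  | [], row => by simp [PySem.List.enumerate_nil, pvPerRow]
  | c :: cn, [] => by
    have : ∀ p ∈ PySem.List.enumerate (c :: cn) (0 : Int),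
        (fun p : Int × String => if pvKeep p.2 then ((PySem.List.pyGet? ([] : List (Option String)) p.1).bind id).map (fun v => p.2 ++ ": " ++ v) else none) p
        = (fun _ => (none : Option String)) p := by
      intro p _
      simp [PySem.List.pyGet?, PySem.List.pyIdx?]
    rw [List.filterMap_congr this]
    simp [pvPerRow]
  | c :: cn, v :: row => by
    rw [PySem.List.enumerate_cons, List.filterMap_cons]
    have shift : ∀ (cs : List String) (s : Nat),
        (PySem.List.enumerate cs ((s : Int) + 1)).filterMap
            (fun p => if pvKeep p.2 then ((PySem.List.pyGet? (v :: row) p.1).bind id).map (fun v => p.2 ++ ": " ++ v) else none)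
        = (PySem.List.enumerate cs (s : Int)).filterMap
            (fun p => if pvKeep p.2 then ((PySem.List.pyGet? row p.1).bind id).map (fun v => p.2 ++ ": " ++ v) else none) := by
      intro cs
      induction cs with
      | nil => intro s; simp [PySem.List.enumerate_nil]
      | cons d ds ih =>
        intro s
        rw [PySem.List.enumerate_cons, PySem.List.enumerate_cons, List.filterMap_cons, List.filterMap_cons]
        have h1 : ((s : Int) + 1) + 1 = ((s + 1 : Nat) : Int) + 1 := by push_cast; ring
        rw [h1, ih (s + 1)]
        rw [PySem.List.pyGet?_cons_succ]
        push_cast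
        rfl
    have h0 : ((0 : Int) + 1) = ((0 : Nat) : Int) + 1 := by norm_num
    rw [h0, shift cn 0, Nat.cast_zero, pv_enum_eq_zip cn row]
    simp only [pvPerRow, List.zip_cons_cons, List.filterMap_cons, PySem.List.pyGet?_zero_cons]
    rfl

-- Per-row equality: A's text_parts list = pvPerRow (Nodup column names).
theorem pv_parts_eq (column_names : List String) (h : column_names.Nodup)
    (row : List (Option String)) :
    (PySem.List.enumerate
        ((column_names.filter pvKeep).map (fun col => (PySem.List.index? column_names col).getD 0)) 0).foldl
      (pvInnerStepA (column_names.filter pvKeep) row) []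
    = pvPerRow column_names row := by
  have h0 : (0 : Int) = ((List.length ([] : List String) : Nat) : Int) := by simp
  rw [h0]
  have := pv_innerA_zip row
      ((column_names.filter pvKeep).map (fun col => (PySem.List.index? column_names col).getD 0))
      [] (column_names.filter pvKeep) [] (by simp)
  simp only [List.nil_append] at this
  rw [this]
  rw [pv_zip_index column_names h
      (fun c k => ((PySem.List.pyGet? row (k : Int)).bind id).map (fun v => c ++ ": " ++ v))]
  rw [← pv_enum_eq_zip column_names row]
  apply List.filterMap_congr
  intro p hp
  rcases (PySem.List.mem_enumerate_iff _ _ _).mp hp with ⟨k, hk, rfl⟩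
  simp

-- A's outer loop equals a filterMap of the per-row record over enumerate(data_rows).
theorem pv_outerA (column_names : List String) (h : column_names.Nodup) :
    ∀ (dr : List (List (Option String))) (s : Int) (acc : List String),
      (PySem.List.enumerate dr s).foldl (fun acc p =>
          let text_parts := (PySem.List.enumerate
              ((column_names.filter pvKeep).map (fun col => (PySem.List.index? column_names col).getD 0)) 0).foldl
            (pvInnerStepA (column_names.filter pvKeep) p.2) []
          if text_parts ≠ [] then
            acc ++ ["Record " ++ PySem.Int.toStr (p.1 + 1) ++ ": " ++ PySem.Str.join "; " text_parts]
          else acc) acc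
      = acc ++ (PySem.List.enumerate dr s).filterMap (fun p =>
          if pvPerRow column_names p.2 = [] then none
          else some ("Record " ++ PySem.Int.toStr (p.1 + 1) ++ ": "
                      ++ PySem.Str.join "; " (pvPerRow column_names p.2)))
  | [], s, acc => by simp [PySem.List.enumerate_nil]
  | r :: dr, s, acc => by
    rw [PySem.List.enumerate_cons, List.foldl_cons, List.filterMap_cons]
    rw [pv_outerA column_names h dr (s + 1) _]
    simp only [pv_parts_eq column_names h r]
    by_cases hp : pvPerRow column_names r = [] <;> simp [hp]

-- Fusing two zipWith passes over the same row list into one.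
theorem pv_zipWith_zipWith {α β : Type} (f g : α → β → α) :
    ∀ (as : List α) (bs : List β),
      List.zipWith g (List.zipWith f as bs) bs = List.zipWith (fun a b => g (f a b) b) as bs
  | [], _ => by simp
  | _ :: _, [] => by simp
  | a :: as, b :: bs => by simp [pv_zipWith_zipWith f g as bs]

-- zipWith that keeps its first argument is the identity when the second list is long enough.
theorem pv_zipWith_keep {α β : Type} :
    ∀ (as : List α) (bs : List β), as.length ≤ bs.length →
      List.zipWith (fun a (_ : β) => a) as bs = as
  | [], _, _ => by simp
  | a :: as, [], h => by simp at h
  | a :: as, b :: bs, h => by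
    simp only [List.zipWith_cons_cons]
    rw [pv_zipWith_keep as bs (by simpa using h)]

-- B's column fold, run from any start column s, appends to each row's slot exactly that row's
-- remaining absolute-index parts (the loop-interchange lemma).
theorem pv_colfold (dr : List (List (Option String))) :
    ∀ (cs : List String) (s : Nat) (parts : List (List String)),
      parts.length = dr.length →
      (PySem.List.enumerate cs (s : Int)).foldl (pvColStep dr) parts
      = List.zipWith (fun ps row => ps ++ (PySem.List.enumerate cs (s : Int)).filterMap
          (fun p => if pvKeep p.2 then ((PySem.List.pyGet? row p.1).bind id).map (fun v => p.2 ++ ": " ++ v) else none))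
          parts dr
  | [], s, parts, h => by
    simp only [PySem.List.enumerate_nil, List.foldl_nil, List.filterMap_nil, List.append_nil]
    exact (pv_zipWith_keep parts dr (le_of_eq h)).symm
  | c :: cs, s, parts, h => by
    rw [PySem.List.enumerate_cons, List.foldl_cons]
    have hs : (s : Int) + 1 = ((s + 1 : Nat) : Int) := by push_cast; ring
    by_cases hk : pvKeep c = true
    · show (PySem.List.enumerate cs ((s:Int)+1)).foldl (pvColStep dr) (pvColStep dr parts ((s:Int), c)) = _
      rw [hs]
      simp only [pvColStep, hk, if_true]
      rw [pv_colfold dr cs (s + 1) _ (by simp [h])]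
      rw [pv_zipWith_zipWith]
      congr 1
      funext ps row
      rw [List.filterMap_cons]
      simp only [hk, if_true]
      cases hr : PySem.List.pyGet? row (s : Int) with
      | none => simp
      | some o => cases o <;> simp
    · show (PySem.List.enumerate cs ((s:Int)+1)).foldl (pvColStep dr) (pvColStep dr parts ((s:Int), c)) = _
      rw [hs]
      simp only [pvColStep, hk, if_false, Bool.false_eq_true]
      rw [pv_colfold dr cs (s + 1) _ h]
      congr 1
      funext ps row
      rw [List.filterMap_cons, if_neg hk]

-- zipWith starting from the all-empty table is a map of the per-row function.
theorem pv_zipWith_nil_map {β : Type} (X : β → List String) :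
    ∀ (bs : List β),
      List.zipWith (fun ps row => ps ++ X row) (bs.map (fun _ => ([] : List String))) bs
      = bs.map X
  | [] => by rfl
  | b :: bs => by
    rw [List.map_cons, List.zipWith_cons_cons, pv_zipWith_nil_map X bs, List.nil_append,
      List.map_cons]

-- enumerate over a mapped list.
theorem pv_enumerate_map {α β : Type} (f : α → β) :
    ∀ (xs : List α) (s : Int),
      PySem.List.enumerate (xs.map f) s = (PySem.List.enumerate xs s).map (fun p => (p.1, f p.2))
  | [], s => by simp [PySem.List.enumerate_nil]
  | x :: xs, s => by
    rw [List.map_cons, PySem.List.enumerate_cons, PySem.List.enumerate_cons,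
      pv_enumerate_map f xs (s + 1)]
    simp

-- B's output loop ('if ps: out.append(...)') as a filterMap.
theorem pv_outfold :
    ∀ (l : List (Int × List String)) (acc : List String),
      l.foldl (fun acc p =>
          if p.2 ≠ [] then
            acc ++ ["Record " ++ PySem.Int.toStr (p.1 + 1) ++ ": " ++ PySem.Str.join "; " p.2]
          else acc) acc
      = acc ++ l.filterMap (fun p =>
          if p.2 = [] then none
          else some ("Record " ++ PySem.Int.toStr (p.1 + 1) ++ ": " ++ PySem.Str.join "; " p.2))
  | [], acc => by simp
  | p :: l, acc => by
    rw [List.foldl_cons, List.filterMap_cons, pv_outfold l _]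
    by_cases hp : p.2 = [] <;> simp [hp]

-- ===== VERDICT (by name: the statement is the Claim_ definition above) =====
theorem format_data_for_llm_spec : Claim_equal_format_data_for_llm := by
  intro column_names data_rows _hDom hPre
  unfold Spec_format_data_for_llm format_data_for_llm format_data_for_llm_alt
  by_cases hdr : data_rows = []
  · simp [hdr]
  · simp only [hdr, if_false]
    congr 1
    rw [pv_outerA column_names hPre.1 data_rows 0 []]
    rw [show (PySem.List.enumerate column_names 0).foldl (pvColStep data_rows)
          (data_rows.map (fun _ => ([] : List String)))
        = List.zipWith (fun ps row => ps ++ (PySem.List.enumerate column_names ((0 : Nat) : Int)).filterMap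
            (fun p => if pvKeep p.2 then ((PySem.List.pyGet? row p.1).bind id).map (fun v => p.2 ++ ": " ++ v) else none))
            (data_rows.map (fun _ => ([] : List String))) data_rows
        from pv_colfold data_rows column_names 0 _ (by simp)]
    have hrow : ∀ row, (PySem.List.enumerate column_names ((0 : Nat) : Int)).filterMap
        (fun p => if pvKeep p.2 then ((PySem.List.pyGet? row p.1).bind id).map (fun v => p.2 ++ ": " ++ v) else none)
        = pvPerRow column_names row := by
      intro row; rw [Nat.cast_zero]; exact pv_enum_eq_zip column_names row
    simp only [hrow]
    rw [pv_zipWith_nil_map (pvPerRow column_names) data_rows]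
    rw [pv_enumerate_map (pvPerRow column_names) data_rows]
    rw [pv_outfold]
    rw [List.nil_append, List.nil_append, List.filterMap_map]
    rfl
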